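-- pv_equiv track=rewrite | github.com/BipinRimal314/comply | src/fincompliance/analysis/engine.py | _rule_to_regulation
-- ===== SOURCE A (Python) =====
-- def _rule_to_regulation(rule_name: str) -> str:
--     """Map rule name to regulation."""
--     prefixes = {
--         "BSA_": "bsa-aml",
--         "SOX_": "sox",
--         "PCI_": "pci-dss",
--         "GLBA_": "glba",
--         "NCUA_": "ncua",
--         "UDAAP_": "udaap",
--         "RegE_": "reg-e",
--         "RegCC_": "reg-cc",
--         "RegDD_": "reg-dd",
--     }
--     for prefix, reg in prefixes.items():
--         if rule_name.startswith(prefix):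
--             return reg
--     return "common"
-- ===== SOURCE B (Python) =====
-- _PREFIX_MAP = {
--     "BSA": "bsa-aml",
--     "SOX": "sox",
--     "PCI": "pci-dss",
--     "GLBA": "glba",
--     "NCUA": "ncua",
--     "UDAAP": "udaap",
--     "RegE": "reg-e",
--     "RegCC": "reg-cc",
--     "RegDD": "reg-dd",
-- }
--
--
-- def _rule_to_regulation(rule_name: str) -> str:
--     """Map rule name to regulation."""
--     i = rule_name.find("_")
--     if i == -1:
--         return "common"
--     return _PREFIX_MAP.get(rule_name[:i], "common")
-- ===== Notes on version B (the rewrite author's own statement) =====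
-- stated objective: idiomatic
-- what changed: Replaces the per-prefix startswith scan with one extraction of the token before the first underscore (str.find + slice) and a single static dict lookup.
import Mathlib
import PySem

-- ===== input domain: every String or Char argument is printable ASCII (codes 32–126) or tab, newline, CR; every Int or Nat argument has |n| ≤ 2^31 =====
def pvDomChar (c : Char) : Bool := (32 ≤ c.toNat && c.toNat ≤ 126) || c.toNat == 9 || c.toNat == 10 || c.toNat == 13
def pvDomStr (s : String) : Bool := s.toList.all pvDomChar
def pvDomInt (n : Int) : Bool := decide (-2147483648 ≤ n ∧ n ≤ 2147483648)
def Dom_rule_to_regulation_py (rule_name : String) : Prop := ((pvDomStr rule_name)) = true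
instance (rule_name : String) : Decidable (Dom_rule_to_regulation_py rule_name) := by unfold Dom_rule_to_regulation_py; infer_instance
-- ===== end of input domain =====

-- B replaces A's per-prefix startswith scan by extracting the token before the first
-- underscore (find + slice) and one lookup in a static dict (objective: idiomatic).


-- ===== PORT A =====
-- the literal dict of A, in insertion order
def aPrefixes : List (String × String) :=
  [("BSA_", "bsa-aml"), ("SOX_", "sox"), ("PCI_", "pci-dss"), ("GLBA_", "glba"),
   ("NCUA_", "ncua"), ("UDAAP_", "udaap"), ("RegE_", "reg-e"), ("RegCC_", "reg-cc"),
   ("RegDD_", "reg-dd")]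

-- 'for prefix, reg in prefixes.items(): if rule_name.startswith(prefix): return reg'
def aLoop (rule_name : String) : List (String × String) → String
  | [] => "common"
  | (p, reg) :: rest =>
      if PySem.Str.startswith rule_name p then reg else aLoop rule_name rest

def rule_to_regulation_py (rule_name : String) : String :=
  aLoop rule_name aPrefixes

-- ===== PORT B =====
def bMap : PySem.Dict String String :=
  PySem.Dict.ofList
    [("BSA", "bsa-aml"), ("SOX", "sox"), ("PCI", "pci-dss"), ("GLBA", "glba"),
     ("NCUA", "ncua"), ("UDAAP", "udaap"), ("RegE", "reg-e"), ("RegCC", "reg-cc"),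
     ("RegDD", "reg-dd")]

def rule_to_regulation_py_alt (rule_name : String) : String :=
  let i := PySem.Str.find rule_name "_"
  if i = -1 then "common"
  else (bMap.get? (PySem.Str.slice rule_name none (some i))).getD "common"

-- ===== PRECONDITION & SPEC =====
def Spec_rule_to_regulation_py (rule_name : String) (out : String) : Prop := out = rule_to_regulation_py_alt rule_name
instance (rule_name : String) (out : String) : Decidable (Spec_rule_to_regulation_py rule_name out) := by unfold Spec_rule_to_regulation_py; infer_instance

-- ===== CLAIM (what is proved, stated in full; the proofs are below) =====
def Claim_equal_rule_to_regulation_py : Prop := ∀ (rule_name : String), Dom_rule_to_regulation_py rule_name → Spec_rule_to_regulation_py rule_name (rule_to_regulation_py rule_name)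

-- ===== LEMMAS AND PROOFS =====

-- Bool equality of strings is decidable equality of their character lists
lemma strBeq_eq_toList (a b : String) : (a == b) = decide (a.toList = b.toList) := by
  by_cases h : a = b
  · subst h; simp
  · have h' : ¬ a.toList = b.toList := fun hc => h (String.toList_inj.mp hc)
    simp [h, h']

-- With n the position of the first '_' of l, 'l starts with key ++ "_"' (key underscore-free)
-- holds exactly when the token before the first underscore equals key.
lemma startswith_key_underscore (l key : List Char) (n : Nat)
    (hkey : '_' ∉ key)
    (h1 : ['_'] <+: l.drop n)
    (h2 : ∀ j < n, ¬ ['_'] <+: l.drop j) :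
    (key ++ ['_'] <+: l) ↔ l.take n = key := by
  obtain ⟨r, hr⟩ := h1
  have hr' : l.drop n = '_' :: r := by rw [← hr]; rfl
  constructor
  · rintro ⟨t, ht⟩
    have ht' : l = key ++ '_' :: t := by rw [← ht]; simp
    have hdropk : l.drop key.length = '_' :: t := by
      rw [ht', List.drop_append_of_le_length (le_refl _)]
      simp
    have hnk : n = key.length := by
      by_contra hne
      rcases Nat.lt_or_ge n key.length with hlt | hge
      · have hget : l[n]? = some '_' := by
          have h0 : (l.drop n)[0]? = some '_' := by rw [hr']; rfl
          simpa using h0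
        have hget' : l[n]? = key[n]? := by
          rw [ht']
          exact List.getElem?_append_left hlt
        have hk' : key[n]? = some '_' := hget'.symm.trans hget
        have hk : key[n] = '_' := by
          have := (List.getElem?_eq_getElem hlt) ▸ hk'
          simpa using this
        exact hkey (hk ▸ List.getElem_mem hlt)
      · have hlt : key.length < n := lt_of_le_of_ne hge (fun h => hne h.symm)
        exact h2 key.length hlt ⟨t, by rw [hdropk]; rfl⟩
    rw [hnk, ht']
    exact List.take_left' (l₁ := key) (l₂ := '_' :: t) rfl
  · intro htake
    refine ⟨r, ?_⟩
    have hl : l = l.take n ++ l.drop n := (List.take_append_drop n l).symm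
    rw [hl, htake, hr']
    simp

-- A's startswith test, as a Bool equation usable for rewriting the chain
lemma startswith_eq_decide (s : String) (key : List Char) (n : Nat)
    (hkey : '_' ∉ key)
    (h1 : ['_'] <+: s.toList.drop n)
    (h2 : ∀ j < n, ¬ ['_'] <+: s.toList.drop j) :
    PySem.Chars.startswith s.toList (key ++ ['_']) = decide (s.toList.take n = key) := by
  rcases h : PySem.Chars.startswith s.toList (key ++ ['_']) with _ | _
  · have hnp : ¬ (key ++ ['_'] <+: s.toList) := by
      intro hp
      rw [(PySem.Chars.startswith_iff s.toList (key ++ ['_'])).mpr hp] at h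
      cases h
    rw [startswith_key_underscore _ _ _ hkey h1 h2] at hnp
    simp [hnp]
  · have hp := (PySem.Chars.startswith_iff s.toList (key ++ ['_'])).mp h
    rw [startswith_key_underscore _ _ _ hkey h1 h2] at hp
    simp [hp]

set_option maxHeartbeats 2000000 in
theorem rule_to_regulation_py_eq (s : String) :
    rule_to_regulation_py s = rule_to_regulation_py_alt s := by
  by_cases hfind : PySem.Str.find s "_" = -1
  · -- no underscore in the name: every prefix test fails, both return "common"
    have hnin : ¬ ("_".toList <:+: s.toList) := (PySem.Str.find_eq_neg_one_iff s "_").mp hfind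
    have hsw : ∀ key : List Char, '_' ∈ key → PySem.Chars.startswith s.toList key = false := by
      intro key hmem
      rcases h : PySem.Chars.startswith s.toList key with _ | _
      · rfl
      · obtain ⟨t, ht⟩ := (PySem.Chars.startswith_iff s.toList key).mp h
        have hmem' : '_' ∈ s.toList := by
          rw [← ht]; exact List.mem_append_left _ hmem
        obtain ⟨u, v, huv⟩ := List.append_of_mem hmem'
        exact absurd ⟨u, v, by rw [huv]; simp⟩ hnin
    unfold rule_to_regulation_py rule_to_regulation_py_alt aPrefixes
    rw [if_pos hfind]
    simp [aLoop, hsw]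
  · -- an underscore exists: both return the lookup of the token before the first one
    have hFeq : PySem.Str.find s "_" = PySem.Chars.find s.toList "_".toList := by simp
    have hpos : 0 ≤ PySem.Str.find s "_" := by
      have hge := PySem.Chars.neg_one_le_find s.toList "_".toList
      rw [hFeq] at hfind ⊢
      omega
    have hspec := PySem.Chars.find_spec (s := s.toList) (sub := "_".toList) (by rw [← hFeq]; exact hpos)
    set n : Nat := (PySem.Chars.find s.toList "_".toList).toNat with hn
    have h1 : ['_'] <+: s.toList.drop n := hspec.1
    have h2 : ∀ j < n, ¬ ['_'] <+: s.toList.drop j := hspec.2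
    have hslice : (PySem.Str.slice s none (some (PySem.Str.find s "_"))).toList = s.toList.take n := by
      rw [PySem.Str.toList_slice, PySem.Chars.slice_eq_listSlice,
          PySem.List.slice_to _ hpos, hFeq]
    have key_eq : ∀ t : String,
        (t == PySem.Str.slice s none (some (PySem.Str.find s "_"))) = decide (s.toList.take n = t.toList) := by
      intro t
      rw [strBeq_eq_toList, hslice, decide_eq_decide]
      exact eq_comm
    have hA : PySem.Chars.startswith s.toList ['B','S','A','_'] = decide (s.toList.take n = "BSA".toList) :=
      startswith_eq_decide s "BSA".toList n (by decide) h1 h2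
    have hB : PySem.Chars.startswith s.toList ['S','O','X','_'] = decide (s.toList.take n = "SOX".toList) :=
      startswith_eq_decide s "SOX".toList n (by decide) h1 h2
    have hC : PySem.Chars.startswith s.toList ['P','C','I','_'] = decide (s.toList.take n = "PCI".toList) :=
      startswith_eq_decide s "PCI".toList n (by decide) h1 h2
    have hD : PySem.Chars.startswith s.toList ['G','L','B','A','_'] = decide (s.toList.take n = "GLBA".toList) :=
      startswith_eq_decide s "GLBA".toList n (by decide) h1 h2
    have hE : PySem.Chars.startswith s.toList ['N','C','U','A','_'] = decide (s.toList.take n = "NCUA".toList) :=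
      startswith_eq_decide s "NCUA".toList n (by decide) h1 h2
    have hF : PySem.Chars.startswith s.toList ['U','D','A','A','P','_'] = decide (s.toList.take n = "UDAAP".toList) :=
      startswith_eq_decide s "UDAAP".toList n (by decide) h1 h2
    have hG : PySem.Chars.startswith s.toList ['R','e','g','E','_'] = decide (s.toList.take n = "RegE".toList) :=
      startswith_eq_decide s "RegE".toList n (by decide) h1 h2
    have hH : PySem.Chars.startswith s.toList ['R','e','g','C','C','_'] = decide (s.toList.take n = "RegCC".toList) :=
      startswith_eq_decide s "RegCC".toList n (by decide) h1 h2
    have hI : PySem.Chars.startswith s.toList ['R','e','g','D','D','_'] = decide (s.toList.take n = "RegDD".toList) :=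
      startswith_eq_decide s "RegDD".toList n (by decide) h1 h2
    unfold rule_to_regulation_py rule_to_regulation_py_alt aPrefixes bMap
    rw [if_neg hfind]
    rw [show (PySem.Dict.ofList
        [("BSA", "bsa-aml"), ("SOX", "sox"), ("PCI", "pci-dss"), ("GLBA", "glba"),
         ("NCUA", "ncua"), ("UDAAP", "udaap"), ("RegE", "reg-e"), ("RegCC", "reg-cc"),
         ("RegDD", "reg-dd")] : PySem.Dict String String) = PySem.Dict.mk
        [("BSA", "bsa-aml"), ("SOX", "sox"), ("PCI", "pci-dss"), ("GLBA", "glba"),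
         ("NCUA", "ncua"), ("UDAAP", "udaap"), ("RegE", "reg-e"), ("RegCC", "reg-cc"),
         ("RegDD", "reg-dd")] from rfl]
    simp only [aLoop, PySem.Str.startswith_eq, PySem.Dict.get?_mk_cons, key_eq]
    simp only [show ("BSA_".toList) = ['B','S','A','_'] from rfl,
               show ("SOX_".toList) = ['S','O','X','_'] from rfl,
               show ("PCI_".toList) = ['P','C','I','_'] from rfl,
               show ("GLBA_".toList) = ['G','L','B','A','_'] from rfl,
               show ("NCUA_".toList) = ['N','C','U','A','_'] from rfl,
               show ("UDAAP_".toList) = ['U','D','A','A','P','_'] from rfl,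
               show ("RegE_".toList) = ['R','e','g','E','_'] from rfl,
               show ("RegCC_".toList) = ['R','e','g','C','C','_'] from rfl,
               show ("RegDD_".toList) = ['R','e','g','D','D','_'] from rfl,
               hA, hB, hC, hD, hE, hF, hG, hH, hI]
    split_ifs <;> rfl

-- ===== VERDICT (by name: the statement is the Claim_ definition above) =====
theorem rule_to_regulation_py_spec : Claim_equal_rule_to_regulation_py := by
  intro s _
  unfold Spec_rule_to_regulation_py
  exact rule_to_regulation_py_eq s
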